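/- GENERATED by farm/worked/mk_tree_copies.py from farm/worked/decode_all.COMPOSITION/Proof.lean (a worked proof of the farm's unit `decode_all.COMPOSITION`,
   accepted by the verdict) — do not edit. -/
import Vorbis.Spec.Units.decode_all_COMPOSITION

/- THE COMPOSITION OF decode_all (in the farm's format): the seven segment statements give the function's contract, by
   `ReachVia.trans` and, for the frame loop `for (k = 0; k < len; k++)`, an induction on the measure `len − k` that the head's
   assertion bounds (`AtLoop.k_le`: the exit `AtLoop (k + 1)` of one round asserts `k + 1 ≤ len`). One round is two segments: 3 (the
   head's test and the call of stb_vorbis_get_frame_float) and 4 (the call of copy_frame, back to the head). No machine code is walked. -/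
open X86 X86.User Asan Vorbis Vorbis.Spec

namespace Vorbis.Spec.Worked.decode_all_COMPOSITION
open Vorbis.Spec.decode_all_COMPOSITION (Statement)

/-- From the epilogue's head the function returns: segment 7. -/
theorem da_from_epi_w {Lay : Layout} {μ : Microarch} {u₀ : State}
    (hseg7 : decode_all.Seg7 Lay μ u₀)
    (others : List Obj) (frames : List (Nat × FrameLayout)) (len : Nat) (u : State) (ret : Word) (others' : List Obj)
    (v : State) (hv : decode_all.AtEpi others frames len u₀ u ret others' v) :
    ReachVia Lay μ WayInv v (Returned (conv u₀) (decode_all.spec others frames len) u ret) :=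
  hseg7 others frames len u ret others' v hv

/-- From the loop's exit the function returns: segment 5 (stb_vorbis_get_error, stb_vorbis_close), segment 6 (put_header, the
result), then the epilogue. -/
theorem da_from_done_w {Lay : Layout} {μ : Microarch} {u₀ : State}
    (hseg5 : decode_all.Seg5 Lay μ u₀) (hseg6 : decode_all.Seg6 Lay μ u₀) (hseg7 : decode_all.Seg7 Lay μ u₀)
    (others : List Obj) (frames : List (Nat × FrameLayout)) (len : Nat) (u : State) (ret : Word) (others' : List Obj)
    (A : Arena) (ysz : Nat → Nat) (f st : Nat) (v : State)
    (hv : decode_all.AtDone others frames len u₀ u ret others' A ysz f st v) :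
    ReachVia Lay μ WayInv v (Returned (conv u₀) (decode_all.spec others frames len) u ret) := by
  apply (hseg5 others frames len u ret others' A ysz f st v hv).trans
  intro w hw
  apply (hseg6 others frames len u ret others' st w hw).trans
  intro x hx
  exact da_from_epi_w hseg7 others frames len u ret others' x hx

/-- From the loop head at `k` the function returns: induction on `m ≥ len − k`. One round (segments 3 and 4) ends at the head at
`k + 1`, whose assertion says `k + 1 ≤ len`, so `len − (k + 1) < len − k`; or at the loop's exit. -/
theorem da_from_loop_w {Lay : Layout} {μ : Microarch} {u₀ : State}
    (hseg3 : decode_all.Seg3 Lay μ u₀) (hseg4 : decode_all.Seg4 Lay μ u₀) (hseg5 : decode_all.Seg5 Lay μ u₀)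
    (hseg6 : decode_all.Seg6 Lay μ u₀) (hseg7 : decode_all.Seg7 Lay μ u₀)
    (others : List Obj) (frames : List (Nat × FrameLayout)) (len : Nat) (u : State) (ret : Word) (others' : List Obj)
    (A : Arena) (ysz : Nat → Nat) (f : Nat) :
    ∀ (m k st : Nat) (v : State), len - k ≤ m →
      decode_all.AtLoop others frames len u₀ u ret others' A ysz f k st v →
      ReachVia Lay μ WayInv v (Returned (conv u₀) (decode_all.spec others frames len) u ret) := by
  intro m
  induction m with
  | zero =>
    intro k st v hm hv
    apply (hseg3 others frames len u ret others' A ysz f k st v hv).trans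
    intro w hw
    rcases hw with ⟨n, hgot⟩ | hdone
    · have hlt := hgot.k_lt
      omega
    · exact da_from_done_w hseg5 hseg6 hseg7 others frames len u ret others' A ysz f st w hdone
  | succ m ih =>
    intro k st v hm hv
    apply (hseg3 others frames len u ret others' A ysz f k st v hv).trans
    intro w hw
    rcases hw with ⟨n, hgot⟩ | hdone
    · apply (hseg4 others frames len u ret others' A ysz f k st n w hgot).trans
      intro x hx
      rcases hx with ⟨st', hnext⟩ | hdone
      · have hle := hnext.k_le
        exact ih (k + 1) st' x (by omega) hnext
      · exact da_from_done_w hseg5 hseg6 hseg7 others frames len u ret others' A ysz f st x hdone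
    · exact da_from_done_w hseg5 hseg6 hseg7 others frames len u ret others' A ysz f st w hdone

end Vorbis.Spec.Worked.decode_all_COMPOSITION

theorem Vorbis.Spec.Worked.decode_all_COMPOSITION_ok : Vorbis.Spec.decode_all_COMPOSITION.Statement := by
  intro Lay hLay μ hμ u₀ hseg1 hseg2 hseg3 hseg4 hseg5 hseg6 hseg7 others frames len u ret he hpre
  apply (hseg1 others frames len u ret he hpre).trans
  intro v1 hv1
  obtain ⟨others', hopen⟩ := hv1
  apply (hseg2 others frames len u ret others' v1 hopen).trans
  intro v2 hv2
  rcases hv2 with ⟨A, ysz, f, hloop⟩ | hepi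
  · exact Vorbis.Spec.Worked.decode_all_COMPOSITION.da_from_loop_w hseg3 hseg4 hseg5 hseg6 hseg7 others frames len u ret others' A ysz
      f len 0 0 v2 (Nat.le_refl _) hloop
  · exact Vorbis.Spec.Worked.decode_all_COMPOSITION.da_from_epi_w hseg7 others frames len u ret others' v2 hepi
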